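-- pv_equiv track=rewrite | github.com/Thunno/Thunno2 | src/build/lib/thunno2/helpers.py | all_slices
-- ===== SOURCE A (Python) =====
-- def one_range(num):
--     if num < 0:
--         return [-i for i in one_range(-num)]
--     return list(range(1, int(num) + 1))
--
-- def all_slices(s):
--     if not s:
--         return [[]]
--     r = []
--     for i in one_range(len(s)):
--         for x in all_slices(s[i:]):
--             r.append([s[:i]] + x)
--     return r
-- ===== SOURCE B (Python) =====
-- def all_slices(s):
--     # DP over suffixes, right-to-left: tbl[k] holds all partitions of the
--     # suffix of length k counted from the current position; each new entry
--     # is built once from the already-computed suffix tables.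
--     tbl = [[[]]]
--     for j in range(len(s) - 1, -1, -1):
--         suf = s[j:]
--         tbl.insert(0, [[suf[:k + 1]] + x for k, p in enumerate(tbl) for x in p])
--     return tbl[0]
-- ===== Notes on version B (the rewrite author's own statement) =====
-- stated objective: alternative
-- what changed: Replaces A's recursion, which recomputes all_slices of every suffix exponentially often, with a single right-to-left dynamic-programming pass that builds each suffix's partition list exactly once and assembles new entries from the stored tables (measured 3.2x at n=16, but the exponential-size output dominates at large n, so no speed label is claimed).
import Mathlib
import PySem

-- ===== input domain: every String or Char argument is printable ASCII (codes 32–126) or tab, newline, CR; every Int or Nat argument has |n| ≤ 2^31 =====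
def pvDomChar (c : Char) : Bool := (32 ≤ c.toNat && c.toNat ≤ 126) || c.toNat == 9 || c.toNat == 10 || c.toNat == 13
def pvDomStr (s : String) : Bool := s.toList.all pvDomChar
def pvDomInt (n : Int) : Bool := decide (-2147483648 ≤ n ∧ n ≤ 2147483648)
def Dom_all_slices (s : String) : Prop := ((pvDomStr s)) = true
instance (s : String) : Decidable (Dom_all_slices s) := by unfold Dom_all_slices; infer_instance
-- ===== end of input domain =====

-- B replaces A's recursion (which recomputes the suffix partition lists many
-- times over) by a right-to-left DP over suffixes, computing each suffix's
-- partition list exactly once; same return value.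

-- ===== PORT A =====
def one_range (num : Int) : List Int :=
  if num < 0 then (one_range (-num)).map (fun i => -i)
  else PySem.List.pyRange 1 (num + 1) 1
termination_by (if num < 0 then 1 else 0)
decreasing_by split_ifs <;> omega

-- the port needs this equation for termination; cited below as well
theorem one_range_nonneg (num : Int) (h : ¬ num < 0) :
    one_range num = PySem.List.pyRange 1 (num + 1) 1 := by
  unfold one_range; rw [if_neg h]

-- core of A on the code points (Python recurses on string slices s[i:], s[:i])
def allA (cs : List Char) : List (List String) :=
  if cs = [] then [[]]
  else (one_range (cs.length : Int)).attach.foldl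
      (fun r i =>
        r ++ (allA (PySem.List.slice cs (some i.1) none)).map
              (fun x => String.ofList (PySem.List.slice cs none (some i.1)) :: x)) []
termination_by cs.length
decreasing_by
  have hneg : ¬((cs.length : Int) < 0) := by omega
  have hm : (i.1 : Int) ∈ PySem.List.pyRange 1 ((cs.length : Int) + 1) 1 := by
    rw [← one_range_nonneg _ hneg]; exact i.2
  rw [PySem.List.mem_pyRange_one] at hm
  simp only [PySem.List.slice_from cs (by omega : (0:Int) ≤ i.1), List.length_drop]
  omega

def all_slices (s : String) : List (List String) := allA s.toList

-- ===== PORT B =====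
-- DP table: altGo suf = [partitions of suf, partitions of suf[1:], …, [[]]];
-- the new front entry is built once from the already-computed suffix entries.
def altGo (cs : List Char) : List (List (List String)) :=
  match cs with
  | [] => [[[]]]
  | c :: t =>
    let tbl := altGo t
    (((PySem.List.enumerate tbl).map (fun kp =>
        kp.2.map (fun x =>
          String.ofList (PySem.List.slice (c :: t) none (some (kp.1 + 1))) :: x))).flatten) :: tbl

def all_slices_alt (s : String) : List (List String) := (altGo s.toList).headD []

-- ===== PRECONDITION & SPEC =====
def Spec_all_slices (s : String) (out : List (List String)) : Prop := out = all_slices_alt s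
instance (s : String) (out : List (List String)) : Decidable (Spec_all_slices s out) := by unfold Spec_all_slices; infer_instance

-- ===== CLAIM (what is proved, stated in full; the proofs are below) =====
def Claim_equal_all_slices : Prop := ∀ (s : String), Dom_all_slices s → Spec_all_slices s (all_slices s)

-- ===== LEMMAS AND PROOFS =====

theorem pyRange_shift (n : Nat) :
    PySem.List.pyRange 1 ((n : Int) + 1) =
      (PySem.List.pyRange 0 (n : Int)).map (· + 1) := by
  induction n with
  | zero => decide
  | succ m ih =>
    push_cast
    rw [PySem.List.pyRange_one_succ_right (a := 1) (b := (m : Int) + 1) (by omega), ih,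
        PySem.List.pyRange_one_succ_right (a := 0) (b := (m : Int)) (by omega)]
    simp

theorem allA_cons (c : Char) (t : List Char) :
    allA (c :: t) =
      (PySem.List.pyRange 0 (((c :: t).length : Int))).flatMap (fun j =>
        (allA (PySem.List.slice (c :: t) (some (j + 1)) none)).map
          (fun x => String.ofList (PySem.List.slice (c :: t) none (some (j + 1))) :: x)) := by
  rw [allA]
  rw [if_neg (by simp)]
  rw [List.foldl_attach (f := fun r v =>
        r ++ (allA (PySem.List.slice (c :: t) (some v) none)).map
              (fun x => String.ofList (PySem.List.slice (c :: t) none (some v)) :: x))]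
  rw [PySem.List.foldl_append_eq_flatMap, List.nil_append]
  rw [one_range_nonneg _ (by omega), pyRange_shift, List.flatMap_map]

theorem headD_tails_map (cs : List Char) :
    ((cs.tails.map allA).headD []) = allA cs := by
  cases cs <;> simp

theorem altGo_eq (cs : List Char) : altGo cs = cs.tails.map allA := by
  induction cs with
  | nil => simp [altGo, allA]
  | cons c t ih =>
    rw [altGo]
    simp only [ih, List.tails_cons, List.map_cons]
    congr 1
    -- entry = allA (c :: t)
    rw [allA_cons]
    rw [PySem.List.enumerate_eq_map_pyRange (t.tails.map allA) [], List.map_map, ← List.flatMap]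
    have hlen : PySem.List.len (t.tails.map allA) = ((c :: t).length : Int) := by
      simp [PySem.List.len, List.length_tails]
    rw [hlen, List.flatMap_def, List.flatMap_def]
    apply congrArg
    apply List.map_congr_left
    intro j hj
    rw [PySem.List.mem_pyRange_one] at hj
    simp only [Function.comp_apply]
    have hjn : (j + 1).toNat = j.toNat + 1 := by omega
    have hlt : j.toNat < t.tails.length := by
      simp only [List.length_tails]
      simp at hj
      omega
    have hget : PySem.List.pyGetD (t.tails.map allA) j [] = allA (t.drop j.toNat) := by
      rw [PySem.List.pyGetD_of_nonneg _ _ (by omega)]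
      rw [List.getD_eq_getElem _ _ (by simpa using hlt), List.getElem_map,
          List.getElem_tails]
    rw [hget, PySem.List.slice_from (c :: t) (by omega : (0:Int) ≤ j + 1), hjn]
    simp

theorem all_slices_spec : Claim_equal_all_slices := by
  intro s _
  unfold Spec_all_slices all_slices all_slices_alt
  rw [altGo_eq, headD_tails_map]
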